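-- pv_equiv track=rewrite | github.com/castogio/advent-of-code-2023 | day13.py | load_matrices
-- ===== SOURCE A (Python) =====
-- Matrix = list[list[str]]
--
-- def load_matrices(s: str) -> list[Matrix]:
--     current = []
--     matrices = [current]
--     for l in s.splitlines():
--         l = l.strip()
--         if l == '':
--             current = []
--             matrices.append(current)
--         else:
--             current.append(list(l))
--     return matrices
-- ===== SOURCE B (Python) =====
-- def load_matrices(s: str) -> list[list[list[str]]]:
--     lines = [l.strip() for l in s.splitlines()]
--     seps = [-1] + [i for i, l in enumerate(lines) if l == ''] + [len(lines)]
--     return [[list(l) for l in lines[a + 1:b]] for a, b in zip(seps, seps[1:])]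
-- ===== Notes on version B (the rewrite author's own statement) =====
-- stated objective: alternative
-- what changed: Replaced the streaming append/reset accumulator loop with a two-pass index approach: collect separator positions (with -1 and len sentinels), then slice the stripped lines between consecutive separators.
import Mathlib
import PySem

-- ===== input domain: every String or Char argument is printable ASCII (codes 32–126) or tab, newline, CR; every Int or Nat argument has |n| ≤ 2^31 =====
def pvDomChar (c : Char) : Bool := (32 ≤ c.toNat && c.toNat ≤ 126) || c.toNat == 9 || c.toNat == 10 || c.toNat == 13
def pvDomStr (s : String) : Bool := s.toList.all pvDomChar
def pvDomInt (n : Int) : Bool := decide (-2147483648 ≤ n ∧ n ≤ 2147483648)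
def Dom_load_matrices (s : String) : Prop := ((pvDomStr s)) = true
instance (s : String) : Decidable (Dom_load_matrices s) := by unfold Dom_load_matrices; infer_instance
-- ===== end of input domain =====

-- B replaces A's streaming append/reset loop by a two-pass separator-index + slicing decomposition; same O(n) cost, equivalence proved in full.


-- ===== PORT A =====
-- list(l) for a string l: the list of its one-character strings (used by both Pythons verbatim)
def pvRow (l : String) : List String := l.toList.map (fun c => String.ofList [c])

-- A's loop: 'current' accumulates rows, a blank (stripped) line freezes it into 'done' and resets
def pvLoopA : List String → List (List String) → List (List (List String)) → List (List (List String))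
  | [], cur, done => done ++ [cur]
  | l :: rest, cur, done =>
    let t := PySem.Str.strip l
    if t = "" then pvLoopA rest [] (done ++ [cur])
    else pvLoopA rest (cur ++ [pvRow t]) done

def load_matrices (s : String) : List (List (List String)) :=
  pvLoopA (PySem.Str.splitlines s) [] []

-- ===== PORT B =====
def load_matrices_alt (s : String) : List (List (List String)) :=
  let lines := (PySem.Str.splitlines s).map PySem.Str.strip
  let seps : List Int :=
    [-1] ++ ((PySem.List.enumerate lines).filter (fun p => p.2 == "")).map (fun p => p.1)
      ++ [PySem.List.len lines]
  (seps.zip (PySem.List.slice seps (some 1) none)).map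
    (fun p => (PySem.List.slice lines (some (p.1 + 1)) (some p.2)).map pvRow)

-- ===== PRECONDITION & SPEC =====
def Spec_load_matrices (s : String) (out : List (List (List String))) : Prop := out = load_matrices_alt s
instance (s : String) (out : List (List (List String))) : Decidable (Spec_load_matrices s out) := by unfold Spec_load_matrices; infer_instance

-- ===== CLAIM (what is proved, stated in full; the proofs are below) =====
def Claim_equal_load_matrices : Prop := ∀ (s : String), Dom_load_matrices s → Spec_load_matrices s (load_matrices s)

-- ===== LEMMAS AND PROOFS =====

-- reference chunker on already-stripped lines (proof-side only)
def pvChunks : List String → List (List (List String))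
  | [] => [[]]
  | m :: rest =>
    if m = "" then [] :: pvChunks rest
    else (pvChunks rest).modifyHead (fun c => pvRow m :: c)

lemma pvLoopA_eq (ls : List String) : ∀ cur done,
    pvLoopA ls cur done
      = done ++ (pvChunks (ls.map PySem.Str.strip)).modifyHead (fun c => cur ++ c) := by
  induction ls with
  | nil => intro cur done; simp [pvLoopA, pvChunks]
  | cons l rest ih =>
    intro cur done
    simp only [pvLoopA, List.map_cons, pvChunks]
    by_cases h : PySem.Str.strip l = ""
    · have hid : ∀ L : List (List (List String)), L.modifyHead (fun c => c) = L := by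
        intro L; cases L <;> rfl
      simp [h, ih, List.append_assoc, hid]
    · simp only [h, if_false, ih]
      congr 1
      cases hc : pvChunks (rest.map PySem.Str.strip) with
      | nil => simp
      | cons c cs => simp [List.append_assoc]

-- separator tail: blank-line indices then the length sentinel
def pvT (ms : List String) : List Int :=
  ((PySem.List.enumerate ms).filter (fun p => p.2 == "")).map (fun p => p.1)
    ++ [PySem.List.len ms]

def pvSeps (ms : List String) : List Int := -1 :: pvT ms

lemma pvBlanks_shift (ms : List String) : ∀ s : Int,
    ((PySem.List.enumerate ms (s + 1)).filter (fun p => p.2 == "")).map (fun p => p.1)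
      = ((((PySem.List.enumerate ms s).filter (fun p => p.2 == "")).map (fun p => p.1)).map (· + 1)) := by
  induction ms with
  | nil => intro s; simp [PySem.List.enumerate_nil]
  | cons m rest ih =>
    intro s
    have h2 := ih (s + 1)
    rw [show (s : Int) + 1 + 1 = s + 2 by ring] at h2
    simp only [PySem.List.enumerate_cons, List.filter_cons]
    by_cases h : m = ""
    · simp [h, h2, add_comm, add_left_comm]
    · simp [h, h2, add_comm, add_left_comm]

lemma pvBlanks_nonneg (ms : List String) :
    ∀ x ∈ ((PySem.List.enumerate ms).filter (fun p => p.2 == "")).map (fun p => p.1), 0 ≤ x := by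
  intro x hx
  simp only [List.mem_map, List.mem_filter] at hx
  obtain ⟨p, ⟨hp, -⟩, rfl⟩ := hx
  rw [PySem.List.mem_enumerate_iff] at hp
  obtain ⟨k, hk, rfl⟩ := hp
  simp

lemma pvSlice_shift (m : String) (ms : List String) (a b : Int) (ha : -1 ≤ a) (hb : 0 ≤ b) :
    PySem.List.slice (m :: ms) (some (a + 1 + 1)) (some (b + 1))
      = PySem.List.slice ms (some (a + 1)) (some b) := by
  rw [PySem.List.slice_toNat _ (by omega) (by omega), PySem.List.slice_toNat _ (by omega) hb]
  have h1 : (a + 1 + 1).toNat = (a + 1).toNat + 1 := by omega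
  have h2 : (b + 1).toNat = b.toNat + 1 := by omega
  rw [h1, h2]
  simp [List.drop_succ_cons]

lemma pvZip_pairs_map (L : List Int) (f : Int → Int) :
    (L.map f).zip ((L.map f).drop 1) = (L.zip (L.drop 1)).map (Prod.map f f) := by
  rw [← List.map_drop, List.zip_map]

lemma pvT_cons (m : String) (rest : List String) :
    pvT (m :: rest)
      = if m = "" then 0 :: (pvT rest).map (· + 1) else (pvT rest).map (· + 1) := by
  have hb := pvBlanks_shift rest 0
  rw [show (0 : Int) + 1 = 1 by decide] at hb
  simp only [pvT, PySem.List.enumerate_cons, List.filter_cons]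
  rw [show (0 : Int) + 1 = 1 by decide]
  by_cases h : m = ""
  · rw [if_pos h]
    rw [show ((((0 : Int), m)).2 == "") = true from by simp [h]]
    simp only [if_true, List.map_cons, hb, List.map_append, List.map_map, List.cons_append,
      PySem.List.len_eq, List.length_cons, List.map_nil]
    push_cast
    rfl
  · rw [if_neg h]
    rw [show ((((0 : Int), m)).2 == "") = false from by simp [h]]
    simp only [if_false, Bool.false_eq_true, hb, List.map_append, List.map_map,
      PySem.List.len_eq, List.length_cons, List.map_cons, List.map_nil]
    push_cast
    rfl

lemma pvT_ne_nil (ms : List String) : pvT ms ≠ [] := by simp [pvT]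

lemma pvT_nonneg (ms : List String) : ∀ x ∈ pvT ms, 0 ≤ x := by
  intro x hx
  simp only [pvT, List.mem_append, List.mem_singleton] at hx
  rcases hx with hx | rfl
  · exact pvBlanks_nonneg ms x hx
  · simp [PySem.List.len_eq]

lemma pvB_eq (ms : List String) :
    ((pvSeps ms).zip ((pvSeps ms).drop 1)).map
        (fun p => (PySem.List.slice ms (some (p.1 + 1)) (some p.2)).map pvRow)
      = pvChunks ms := by
  induction ms with
  | nil => rfl
  | cons m rest ih =>
    by_cases h : m = ""
    · -- blank line: a fresh empty chunk, then the chunks of rest shifted by one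
      have hseps : pvSeps (m :: rest) = -1 :: ((pvSeps rest).map (· + 1)) := by
        simp [pvSeps, pvT_cons, h]
      rw [hseps]
      simp only [List.drop_succ_cons, List.drop_zero]
      rw [show ((pvSeps rest).map (· + 1)) = (0 : Int) :: (pvT rest).map (· + 1) by simp [pvSeps]]
      rw [List.zip_cons_cons, List.map_cons]
      rw [show ((0 : Int) :: (pvT rest).map (· + 1)) = (pvSeps rest).map (· + 1) by simp [pvSeps]]
      rw [show (pvT rest).map (· + 1) = ((pvSeps rest).map (· + 1)).drop 1 by simp [pvSeps]]
      rw [pvZip_pairs_map]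
      rw [List.map_map]
      have hcong :
          ((pvSeps rest).zip ((pvSeps rest).drop 1)).map
              ((fun p => (PySem.List.slice (m :: rest) (some (p.1 + 1)) (some p.2)).map pvRow)
                ∘ Prod.map (· + 1) (· + 1))
            = ((pvSeps rest).zip ((pvSeps rest).drop 1)).map
              (fun p => (PySem.List.slice rest (some (p.1 + 1)) (some p.2)).map pvRow) := by
        apply List.map_congr_left
        intro q hq
        obtain ⟨hq1, hq2⟩ := List.of_mem_zip hq
        have ha : -1 ≤ q.1 := by
          rcases List.mem_cons.mp hq1 with h1 | h1
          · omega
          · have := pvT_nonneg rest q.1 h1; omega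
        have hb : 0 ≤ q.2 := pvT_nonneg rest q.2 (by simpa [pvSeps] using hq2)
        simp only [Function.comp_apply, Prod.map_fst, Prod.map_snd]
        rw [pvSlice_shift m rest q.1 q.2 ha hb]
      rw [hcong, ih]
      have hfirst :
          (PySem.List.slice (m :: rest) (some (-1 + 1)) (some 0)).map pvRow = [] := by
        rw [show (-1 : Int) + 1 = 0 from by ring]
        simp [PySem.List.slice_to]
      rw [hfirst]
      simp [pvChunks, h]
    · -- nonblank line: prepend its row to the head chunk
      obtain ⟨t0, T', hT⟩ : ∃ t0 T', pvT rest = t0 :: T' := by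
        cases hT : pvT rest with
        | nil => exact absurd hT (pvT_ne_nil rest)
        | cons a b => exact ⟨a, b, rfl⟩
      have ht0 : 0 ≤ t0 := pvT_nonneg rest t0 (by rw [hT]; exact List.mem_cons_self)
      have hseps : pvSeps (m :: rest) = -1 :: ((t0 :: T').map (· + 1)) := by
        simp [pvSeps, pvT_cons, h, hT]
      rw [hseps]
      simp only [List.map_cons, List.drop_succ_cons, List.drop_zero, List.zip_cons_cons,
        List.map_cons]
      rw [show T'.map (· + 1) = ((t0 :: T').map (· + 1)).drop 1 from by simp]
      rw [show ((t0 + 1) :: List.drop 1 ((t0 :: T').map (· + 1)))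
            = ((t0 :: T').map (· + 1)) from by simp]
      rw [pvZip_pairs_map, List.map_map]
      have hcong :
          ((t0 :: T').zip ((t0 :: T').drop 1)).map
              ((fun p => (PySem.List.slice (m :: rest) (some (p.1 + 1)) (some p.2)).map pvRow)
                ∘ Prod.map (· + 1) (· + 1))
            = ((t0 :: T').zip ((t0 :: T').drop 1)).map
              (fun p => (PySem.List.slice rest (some (p.1 + 1)) (some p.2)).map pvRow) := by
        apply List.map_congr_left
        intro q hq
        obtain ⟨hq1, hq2⟩ := List.of_mem_zip hq
        have ha : -1 ≤ q.1 := by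
          have := pvT_nonneg rest q.1 (hT ▸ hq1); omega
        have hb : 0 ≤ q.2 := pvT_nonneg rest q.2 (hT ▸ List.mem_of_mem_drop hq2)
        simp only [Function.comp_apply, Prod.map_fst, Prod.map_snd]
        rw [pvSlice_shift m rest q.1 q.2 ha hb]
      rw [hcong]
      have hfirst :
          PySem.List.slice (m :: rest) (some (-1 + 1)) (some (t0 + 1))
            = m :: PySem.List.slice rest (some (-1 + 1)) (some t0) := by
        rw [show (-1 : Int) + 1 = 0 from by ring]
        rw [PySem.List.slice_toNat _ (by omega) (by omega),
          PySem.List.slice_toNat _ (by omega) ht0]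
        have : (t0 + 1).toNat = t0.toNat + 1 := by omega
        simp [this]
      rw [hfirst]
      have hih := ih
      rw [show (pvSeps rest).drop 1 = t0 :: T' from by simp [pvSeps, hT]] at hih
      rw [show pvSeps rest = -1 :: t0 :: T' from by simp [pvSeps, hT]] at hih
      rw [List.zip_cons_cons, List.map_cons] at hih
      rw [show List.drop 1 (t0 :: T') = T' from rfl]
      rw [pvChunks, if_neg h, ← hih]
      simp

theorem pv_main (s : String) : load_matrices s = load_matrices_alt s := by
  unfold load_matrices load_matrices_alt
  rw [pvLoopA_eq]
  have hsl : PySem.List.slice (pvSeps ((PySem.Str.splitlines s).map PySem.Str.strip))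
        (some 1) none
      = (pvSeps ((PySem.Str.splitlines s).map PySem.Str.strip)).drop 1 := by
    rw [PySem.List.slice_from_one]
    exact List.drop_one.symm
  show [] ++ (pvChunks ((PySem.Str.splitlines s).map PySem.Str.strip)).modifyHead
        (fun c => [] ++ c)
      = ((pvSeps ((PySem.Str.splitlines s).map PySem.Str.strip)).zip
          (PySem.List.slice (pvSeps ((PySem.Str.splitlines s).map PySem.Str.strip))
            (some 1) none)).map
        (fun p => (PySem.List.slice ((PySem.Str.splitlines s).map PySem.Str.strip)
            (some (p.1 + 1)) (some p.2)).map pvRow)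
  rw [hsl, pvB_eq]
  have hid : ∀ L : List (List (List String)), L.modifyHead (fun c => c) = L := by
    intro L; cases L <;> rfl
  simp [hid]

-- ===== VERDICT (by name: the statement is the Claim_ definition above) =====
theorem load_matrices_spec : Claim_equal_load_matrices := by
  intro s _
  unfold Spec_load_matrices
  exact pv_main s
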